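-- pv_equiv track=rewrite | github.com/ChloeXu/square-one | coding/cyclic_sort.py | sort_with_n_square_time_complexity
-- ===== SOURCE A (Python) =====
-- def sort_with_n_square_time_complexity(nums):
-- 	i_ind = 0
-- 	while i_ind < len(nums):
-- 		for j in range(i_ind, len(nums)):
-- 			if nums[j] == i_ind + 1:
-- 				nums[j], nums[i_ind] = nums[i_ind], nums[j]
-- 				break
--
-- 		i_ind += 1
--
-- 	return nums
-- ===== SOURCE B (Python) =====
-- # Same cyclic-sort result, but the inner linear rescan of A is replaced by a
-- # dict mapping each value to the ascending list of positions where it currently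
-- # lives (positions < i are frozen, so stale entries below i are harmless and
-- # skipped by the binary search).  Like A, mutates nums in place and returns it.
-- import bisect
--
--
-- def sort_with_n_square_time_complexity(nums):
--     occ = {}
--     for idx, v in enumerate(nums):
--         occ.setdefault(v, []).append(idx)
--     for i in range(len(nums)):
--         lst = occ.get(i + 1, [])
--         p = bisect.bisect_left(lst, i)
--         if p < len(lst):
--             j = lst.pop(p)
--             v = nums[i]
--             nums[i], nums[j] = i + 1, v
--             bisect.insort_left(occ.setdefault(v, []), j)
--     return nums
-- ===== Notes on version B (the rewrite author's own statement) =====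
-- stated objective: faster
-- what changed: A rescans the suffix nums[i:] linearly for value i+1 at every step; B builds one dict from value to its ascending list of positions and finds the first position >= i by binary search (bisect), updating the two affected index lists after each swap, so the quadratic inner scan disappears.
import Mathlib
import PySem

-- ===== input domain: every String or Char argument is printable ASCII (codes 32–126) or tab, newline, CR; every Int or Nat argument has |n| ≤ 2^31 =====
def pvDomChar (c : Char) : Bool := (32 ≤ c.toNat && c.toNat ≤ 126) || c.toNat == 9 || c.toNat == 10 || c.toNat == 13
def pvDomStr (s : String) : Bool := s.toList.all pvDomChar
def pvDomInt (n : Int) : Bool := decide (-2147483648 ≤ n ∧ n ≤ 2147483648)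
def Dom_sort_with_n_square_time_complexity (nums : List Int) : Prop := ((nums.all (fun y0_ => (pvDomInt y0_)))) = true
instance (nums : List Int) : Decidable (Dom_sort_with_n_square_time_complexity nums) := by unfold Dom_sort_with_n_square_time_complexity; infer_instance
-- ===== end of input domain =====

-- B replaces A's quadratic inner rescans by a dict from value to its ascending list of
-- current positions plus binary search (objective: faster).  Both A and B mutate the
-- Python list in place; the equivalence proved here is about the returned value.

-- ===== PORT A =====
-- inner 'for j in range(i_ind, len(nums))' with break: scan for the first j ≥ i with nums[j] = i+1, swap
def innerA (l : List Int) (i j : Nat) : List Int :=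
  if j < l.length then
    if l.getD j 0 = (i : Int) + 1 then
      (l.set j (l.getD i 0)).set i (l.getD j 0)
    else innerA l i (j + 1)
  else l
termination_by l.length - j

-- length preservation, needed by outerA's termination proof
theorem innerA_length (l : List Int) (i j : Nat) : (innerA l i j).length = l.length := by
  induction j using innerA.induct l i with
  | case1 j h he => rw [innerA, if_pos h, if_pos he]; simp
  | case2 j h he ih => rw [innerA, if_pos h, if_neg he]; exact ih
  | case3 j h => rw [innerA, if_neg h]

-- outer 'while i_ind < len(nums)'
def outerA (l : List Int) (i : Nat) : List Int :=
  if i < l.length then outerA (innerA l i i) (i + 1) else l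
termination_by l.length - i
decreasing_by rw [innerA_length]; omega

def sort_with_n_square_time_complexity (nums : List Int) : List Int :=
  outerA nums 0

-- ===== PORT B =====
-- bisect.insort_left(lst, x)
def insortLeft (lst : List Int) (x : Int) : List Int :=
  let q := PySem.List.bisectLeft lst x
  lst.take q ++ x :: lst.drop q

-- for idx, v in enumerate(nums): occ.setdefault(v, []).append(idx)
def buildOcc (nums : List Int) : PySem.Dict Int (List Int) :=
  (PySem.List.enumerate nums).foldl
    (fun d p => d.insert p.2 (d.getD p.2 [] ++ [p.1])) PySem.Dict.empty

-- for i in range(len(nums)): look up the first position ≥ i of value i+1, swap, update the index lists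
def loopB (n : Nat) (l : List Int) (occ : PySem.Dict Int (List Int)) (i : Nat) : List Int :=
  if i < n then
    let lst := occ.getD ((i : Int) + 1) []
    let p := PySem.List.bisectLeft lst (i : Int)
    if p < lst.length then
      let j := lst.getD p 0
      let occ1 := occ.insert ((i : Int) + 1) (lst.eraseIdx p)
      let v := l.getD i 0
      let l' := (l.set i ((i : Int) + 1)).set j.toNat v
      let occ2 := occ1.insert v (insortLeft (occ1.getD v []) j)
      loopB n l' occ2 (i + 1)
    else loopB n l occ (i + 1)
  else l
termination_by n - i

def sort_with_n_square_time_complexity_alt (nums : List Int) : List Int :=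
  loopB nums.length nums (buildOcc nums) 0

-- ===== PRECONDITION & SPEC =====
def Spec_sort_with_n_square_time_complexity (nums : List Int) (out : List Int) : Prop := out = sort_with_n_square_time_complexity_alt nums
instance (nums : List Int) (out : List Int) : Decidable (Spec_sort_with_n_square_time_complexity nums out) := by unfold Spec_sort_with_n_square_time_complexity; infer_instance

-- ===== CLAIM (what is proved, stated in full; the proofs are below) =====
def Claim_equal_sort_with_n_square_time_complexity : Prop := ∀ (nums : List Int), Dom_sort_with_n_square_time_complexity nums → Spec_sort_with_n_square_time_complexity nums (sort_with_n_square_time_complexity nums)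

-- ===== LEMMAS AND PROOFS =====

-- getD/set helpers
theorem getD_set_ne (l : List Int) (m k : Nat) (x d : Int) (h : m ≠ k) :
    (l.set m x).getD k d = l.getD k d := by
  simp [List.getD_eq_getElem?_getD, List.getElem?_set_ne h]

theorem getD_set_self (l : List Int) (m : Nat) (x d : Int) (h : m < l.length) :
    (l.set m x).getD m d = x := by
  simp [List.getD_eq_getElem?_getD, List.getElem?_set_self, h]

theorem set_getD_self (l : List Int) (i : Nat) (h : i < l.length) :
    l.set i (l.getD i 0) = l := by
  have : l.getD i 0 = l[i] := by simp [List.getD_eq_getElem?_getD, List.getElem?_eq_getElem h]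
  rw [this, List.set_getElem_self]

theorem getD_append_len (s t : List Int) (x d : Int) : (s ++ x :: t).getD s.length d = x := by
  induction s with
  | nil => rfl
  | cons a s ih => simpa using ih

theorem eraseIdx_append_len (s t : List Int) (x : Int) :
    (s ++ x :: t).eraseIdx s.length = s ++ t := by
  induction s with
  | nil => rfl
  | cons a s ih => simpa using ih

-- positions ≥ k at which l holds v, ascending (as Python ints)
def posns (l : List Int) (v : Int) (k : Nat) : List Int :=
  if k < l.length then
    if l.getD k 0 = v then (k : Int) :: posns l v (k + 1) else posns l v (k + 1)
  else []
termination_by l.length - k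

theorem posns_nil (l : List Int) (v : Int) (k : Nat) (h : ¬ k < l.length) : posns l v k = [] := by
  rw [posns, if_neg h]

theorem posns_cons_pos (l : List Int) (v : Int) (k : Nat) (h : k < l.length)
    (he : l.getD k 0 = v) : posns l v k = (k : Int) :: posns l v (k + 1) := by
  rw [posns, if_pos h, if_pos he]

theorem posns_cons_neg (l : List Int) (v : Int) (k : Nat) (h : k < l.length)
    (he : l.getD k 0 ≠ v) : posns l v k = posns l v (k + 1) := by
  rw [posns, if_pos h, if_neg he]

theorem posns_mem (l : List Int) (v : Int) (k : Nat) :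
    ∀ x ∈ posns l v k, ∃ m : Nat, x = (m : Int) ∧ k ≤ m ∧ m < l.length ∧ l.getD m 0 = v := by
  induction k using posns.induct l v with
  | case1 k h he ih =>
    rw [posns_cons_pos l v k h he]
    intro x hx
    rcases List.mem_cons.1 hx with hx | hx
    · exact ⟨k, hx, le_refl _, h, he⟩
    · obtain ⟨m, h1, h2, h3, h4⟩ := ih x hx
      exact ⟨m, h1, by omega, h3, h4⟩
  | case2 k h he ih =>
    rw [posns_cons_neg l v k h he]
    intro x hx
    obtain ⟨m, h1, h2, h3, h4⟩ := ih x hx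
    exact ⟨m, h1, by omega, h3, h4⟩
  | case3 k h => rw [posns_nil l v k h]; simp

theorem posns_ge (l : List Int) (v : Int) (k : Nat) : ∀ x ∈ posns l v k, (k : Int) ≤ x := by
  intro x hx
  obtain ⟨m, h1, h2, _, _⟩ := posns_mem l v k x hx
  omega

theorem posns_pairwise (l : List Int) (v : Int) (k : Nat) :
    (posns l v k).Pairwise (· ≤ ·) := by
  induction k using posns.induct l v with
  | case1 k h he ih =>
    rw [posns_cons_pos l v k h he]
    refine List.Pairwise.cons ?_ ih
    intro x hx
    have := posns_ge l v (k + 1) x hx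
    omega
  | case2 k h he ih => rw [posns_cons_neg l v k h he]; exact ih
  | case3 k h => rw [posns_nil l v k h]; exact List.Pairwise.nil

theorem posns_head (l : List Int) (v : Int) (k : Nat) (x : Int) (r : List Int)
    (hP : posns l v k = x :: r) :
    ∃ m : Nat, x = (m : Int) ∧ k ≤ m ∧ m < l.length ∧ l.getD m 0 = v ∧ r = posns l v (m + 1) := by
  revert hP
  induction k using posns.induct l v with
  | case1 k h he ih =>
    intro hP
    rw [posns_cons_pos l v k h he] at hP
    obtain ⟨h1, h2⟩ := List.cons.inj hP
    exact ⟨k, h1.symm, le_refl _, h, he, h2.symm⟩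
  | case2 k h he ih =>
    intro hP
    rw [posns_cons_neg l v k h he] at hP
    obtain ⟨m, h1, h2, h3, h4, h5⟩ := ih hP
    exact ⟨m, h1, by omega, h3, h4, h5⟩
  | case3 k h =>
    intro hP
    rw [posns_nil l v k h] at hP; exact absurd hP (by simp)

theorem posns_set_lt (l : List Int) (v x : Int) (m k : Nat) (hm : m < k) :
    posns (l.set m x) v k = posns l v k := by
  revert hm
  induction k using posns.induct l v with
  | case1 k h he ih =>
    intro hm
    rw [posns_cons_pos l v k h he,
        posns_cons_pos (l.set m x) v k (by simpa using h)
          (by rw [getD_set_ne l m k x 0 (by omega)]; exact he)]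
    rw [ih (by omega)]
  | case2 k h he ih =>
    intro hm
    rw [posns_cons_neg l v k h he,
        posns_cons_neg (l.set m x) v k (by simpa using h)
          (by rw [getD_set_ne l m k x 0 (by omega)]; exact he)]
    exact ih (by omega)
  | case3 k h =>
    intro hm
    rw [posns_nil l v k h, posns_nil (l.set m x) v k (by simpa using h)]

theorem posns_set_other (l : List Int) (v x : Int) (m k : Nat)
    (hx : x ≠ v) (hm : l.getD m 0 ≠ v) :
    posns (l.set m x) v k = posns l v k := by
  induction k using posns.induct l v with
  | case1 k h he ih =>
    have hkm : k ≠ m := by rintro rfl; exact hm he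
    rw [posns_cons_pos l v k h he,
        posns_cons_pos (l.set m x) v k (by simpa using h)
          (by rw [getD_set_ne l m k x 0 (Ne.symm hkm)]; exact he), ih]
  | case2 k h he ih =>
    rw [posns_cons_neg l v k h he]
    by_cases hkm : k = m
    · subst hkm
      rw [posns_cons_neg (l.set k x) v k (by simpa using h)
          (by rw [getD_set_self l k x 0 h]; exact hx)]
      exact ih
    · rw [posns_cons_neg (l.set m x) v k (by simpa using h)
          (by rw [getD_set_ne l m k x 0 (Ne.symm hkm)]; exact he)]
      exact ih
  | case3 k h => rw [posns_nil l v k h, posns_nil (l.set m x) v k (by simpa using h)]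

theorem posns_set_head (l : List Int) (v x : Int) (jn k : Nat) (r : List Int)
    (hx : x ≠ v) (hP : posns l v k = (jn : Int) :: r) :
    posns (l.set jn x) v k = r := by
  revert hP
  induction k using posns.induct l v with
  | case1 k h he ih =>
    intro hP
    rw [posns_cons_pos l v k h he] at hP
    obtain ⟨h1, h2⟩ := List.cons.inj hP
    have hjk : jn = k := by omega
    subst hjk
    rw [posns_cons_neg (l.set jn x) v jn (by simpa using h)
        (by rw [getD_set_self l jn x 0 h]; exact hx)]
    rw [posns_set_lt l v x jn (jn + 1) (by omega)]
    exact h2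
  | case2 k h he ih =>
    intro hP
    rw [posns_cons_neg l v k h he] at hP
    have hjk : k < jn := by
      obtain ⟨m, h1, h2, _, _⟩ := posns_mem l v (k + 1) _ (hP ▸ List.mem_cons_self ..)
      omega
    rw [posns_cons_neg (l.set jn x) v k (by simpa using h)
        (by rw [getD_set_ne l jn k x 0 (by omega)]; exact he)]
    exact ih hP
  | case3 k h =>
    intro hP
    rw [posns_nil l v k h] at hP; exact absurd hP (by simp)

theorem posns_set_self (l : List Int) (v : Int) (m k : Nat)
    (hk : k ≤ m) (hlen : m < l.length) (hm : l.getD m 0 ≠ v) :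
    posns (l.set m v) v k =
      (posns l v k).takeWhile (fun y => y < (m : Int)) ++
        (m : Int) :: (posns l v k).dropWhile (fun y => y < (m : Int)) := by
  revert hk
  induction k using posns.induct l v with
  | case1 k h he ih =>
    intro hk
    have hkm : k ≠ m := by rintro rfl; exact hm he
    rw [posns_cons_pos l v k h he,
        posns_cons_pos (l.set m v) v k (by simpa using h)
          (by rw [getD_set_ne l m k v 0 (Ne.symm hkm)]; exact he)]
    have hlt : ((k : Int) < (m : Int)) := by omega
    rw [List.takeWhile_cons, List.dropWhile_cons]
    simp only [hlt, decide_true, if_true]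
    rw [List.cons_append, ih (by omega)]
  | case2 k h he ih =>
    intro hk
    by_cases hkm : k = m
    · subst hkm
      rw [posns_cons_pos (l.set k v) v k (by simpa using h) (getD_set_self l k v 0 h),
          posns_set_lt l v v k (k + 1) (by omega),
          posns_cons_neg l v k h he]
      have hall : (posns l v (k + 1)).takeWhile (fun y => y < (k : Int)) = [] := by
        cases hQ : posns l v (k + 1) with
        | nil => rfl
        | cons a Q =>
          have := posns_ge l v (k + 1) a (hQ ▸ List.mem_cons_self ..)
          rw [List.takeWhile_cons]
          simp only [show ¬ (a < (k:Int)) by omega, decide_false]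
          simp
      have hdrop : (posns l v (k + 1)).dropWhile (fun y => y < (k : Int)) = posns l v (k + 1) := by
        cases hQ : posns l v (k + 1) with
        | nil => rfl
        | cons a Q =>
          have := posns_ge l v (k + 1) a (hQ ▸ List.mem_cons_self ..)
          rw [List.dropWhile_cons]
          simp only [show ¬ (a < (k:Int)) by omega, decide_false]
          simp
      rw [hall, hdrop]
      simp
    · rw [posns_cons_neg l v k h he,
          posns_cons_neg (l.set m v) v k (by simpa using h)
            (by rw [getD_set_ne l m k v 0 (Ne.symm hkm)]; exact he)]
      exact ih (by omega)
  | case3 k h =>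
    intro hk
    omega

-- pin down bisect_left: if lst = u ++ w with u strictly below x and w at least x, bisect_left = |u|
theorem bisectLeft_eq (u w : List Int) (x : Int)
    (hp : (u ++ w).Pairwise (· ≤ ·))
    (hu : ∀ y ∈ u, y < x) (hw : ∀ y ∈ w, x ≤ y) :
    PySem.List.bisectLeft (u ++ w) x = u.length := by
  obtain ⟨hb1, hb2, hb3⟩ := PySem.List.bisectLeft_spec (u ++ w) x hp
  set b := PySem.List.bisectLeft (u ++ w) x with hbdef
  have hlen : (u ++ w).length = u.length + w.length := by simp
  rcases Nat.lt_trichotomy b u.length with hlt | heq | hgt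
  · exfalso
    have hbl : b < (u ++ w).length := by omega
    have hg : (u ++ w)[b]'hbl = u[b]'hlt := List.getElem_append_left hlt
    have h1 := hb3 b hbl (le_refl _)
    rw [hg] at h1
    have h2 : u[b]'hlt < x := hu _ (List.getElem_mem hlt)
    omega
  · exact heq
  · exfalso
    have hul : u.length < (u ++ w).length := by omega
    have hsub : u.length - u.length < w.length := by
      have : u.length < u.length + w.length := by omega
      omega
    have hg : (u ++ w)[u.length]'hul = w[u.length - u.length]'hsub :=
      List.getElem_append_right (le_refl u.length)
    have h1 := hb2 u.length hul hgt
    rw [hg] at h1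
    have h2 : x ≤ w[u.length - u.length]'hsub := hw _ (List.getElem_mem hsub)
    omega

theorem insortLeft_split (u w : List Int) (x : Int)
    (hp : (u ++ w).Pairwise (· ≤ ·))
    (hu : ∀ y ∈ u, y < x) (hw : ∀ y ∈ w, x ≤ y) :
    insortLeft (u ++ w) x = u ++ x :: w := by
  show (u ++ w).take (PySem.List.bisectLeft (u ++ w) x) ++
      x :: (u ++ w).drop (PySem.List.bisectLeft (u ++ w) x) = u ++ x :: w
  rw [bisectLeft_eq u w x hp hu hw, List.take_left, List.drop_left]

theorem dropWhile_ge (Q : List Int) (x : Int) (hp : Q.Pairwise (· ≤ ·)) :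
    ∀ y ∈ Q.dropWhile (fun a => decide (a < x)), x ≤ y := by
  induction Q with
  | nil => simp
  | cons q Q ih =>
    rw [List.dropWhile_cons]
    by_cases hq : q < x
    · simp only [hq, decide_true, if_true]
      exact ih hp.of_cons
    · simp only [hq, decide_false, if_false]
      intro y hy
      rcases List.mem_cons.1 hy with rfl | hy
      · omega
      · have := (List.pairwise_cons.1 hp).1 y hy
        omega

-- the loop invariant: each dict entry is stale indices < i followed by the ascending
-- positions ≥ i currently holding the key
def LoopInv (l : List Int) (occ : PySem.Dict Int (List Int)) (i : Nat) : Prop :=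
  ∀ v : Int, ∃ s : List Int,
    (∀ x ∈ s, x < (i : Int)) ∧ s.Pairwise (· ≤ ·) ∧ occ.getD v [] = s ++ posns l v i

theorem pairwise_stale_posns (s : List Int) (l : List Int) (v : Int) (i : Nat)
    (hs : ∀ x ∈ s, x < (i : Int)) (hsp : s.Pairwise (· ≤ ·)) :
    (s ++ posns l v i).Pairwise (· ≤ ·) := by
  rw [List.pairwise_append]
  refine ⟨hsp, posns_pairwise l v i, ?_⟩
  intro a ha b hb
  have := hs a ha
  have := posns_ge l v i b hb
  omega

theorem inv_step_none (l : List Int) (occ : PySem.Dict Int (List Int)) (i : Nat)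
    (h : LoopInv l occ i) (hi : i < l.length) : LoopInv l occ (i + 1) := by
  intro w
  obtain ⟨s, hs, hsp, ho⟩ := h w
  by_cases hw : l.getD i 0 = w
  · refine ⟨s ++ [(i : Int)], ?_, ?_, ?_⟩
    · intro x hx
      rcases List.mem_append.1 hx with hx | hx
      · have := hs x hx; omega
      · simp at hx; omega
    · rw [List.pairwise_append]
      refine ⟨hsp, List.pairwise_singleton _ _, ?_⟩
      intro a ha b hb
      simp at hb
      have := hs a ha
      omega
    · rw [ho, posns_cons_pos l w i hi hw]
      simp
  · refine ⟨s, fun x hx => by have := hs x hx; omega, hsp, ?_⟩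
    rw [ho, posns_cons_neg l w i hi hw]

theorem inv_step_swap (l : List Int) (occ : PySem.Dict Int (List Int)) (i jn : Nat)
    (s P : List Int)
    (h : LoopInv l occ i) (hi : i < l.length)
    (hs : ∀ x ∈ s, x < (i : Int)) (hsp : s.Pairwise (· ≤ ·))
    (ho : occ.getD ((i : Int) + 1) [] = s ++ (jn : Int) :: P)
    (hP : posns l ((i : Int) + 1) i = (jn : Int) :: P) :
    LoopInv ((l.set i ((i : Int) + 1)).set jn (l.getD i 0))
      ((occ.insert ((i : Int) + 1) (s ++ P)).insert (l.getD i 0)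
        (insortLeft ((occ.insert ((i : Int) + 1) (s ++ P)).getD (l.getD i 0) []) (jn : Int)))
      (i + 1) := by
  obtain ⟨m, hmeq, him, hml, hmv, hPr⟩ := posns_head l ((i : Int) + 1) i ((jn : Int)) P hP
  have hmjn : jn = m := by omega
  subst hmjn
  intro w
  have hg1 : ∀ u : Int, ((occ.insert ((i : Int) + 1) (s ++ P)).getD u []) =
      if u = (i : Int) + 1 then s ++ P else occ.getD u [] :=
    fun u => PySem.Dict.getD_insert occ _ u _ _
  have hg2 : (((occ.insert ((i : Int) + 1) (s ++ P)).insert (l.getD i 0)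
        (insortLeft ((occ.insert ((i : Int) + 1) (s ++ P)).getD (l.getD i 0) []) (jn : Int))).getD w []) =
      if w = l.getD i 0 then
        insortLeft ((occ.insert ((i : Int) + 1) (s ++ P)).getD (l.getD i 0) []) (jn : Int)
      else (occ.insert ((i : Int) + 1) (s ++ P)).getD w [] :=
    PySem.Dict.getD_insert _ _ _ _ _
  by_cases hw0 : w = l.getD i 0
  · by_cases hw1 : w = (i : Int) + 1
    · -- w = old nums[i] = i+1: the found position is i itself and the swap is a no-op
      have hv01 : l.getD i 0 = (i : Int) + 1 := by rw [← hw0, hw1]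
      have hji : jn = i := by
        have hc := posns_cons_pos l ((i : Int) + 1) i hi hv01
        rw [hP] at hc
        obtain ⟨h1, _⟩ := List.cons.inj hc
        omega
      have hji2 : i = jn := hji.symm
      subst hji2
      have hPP : P = posns l ((i : Int) + 1) (i + 1) := hPr
      have hPge : ∀ y ∈ P, (i : Int) ≤ y := by
        intro y hy
        rw [hPP] at hy
        have := posns_ge l ((i : Int) + 1) (i + 1) y hy
        omega
      refine ⟨s ++ [(i : Int)], ?_, ?_, ?_⟩
      · intro x hx
        rcases List.mem_append.1 hx with hx | hx
        · have := hs x hx; omega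
        · simp at hx; omega
      · rw [List.pairwise_append]
        exact ⟨hsp, List.pairwise_singleton _ _,
          fun a ha b hb => by simp at hb; subst hb; have := hs a ha; omega⟩
      · rw [hg2, if_pos hw0, hv01, hg1, if_pos rfl]
        rw [insortLeft_split s P ((i : Int))
          (by rw [List.pairwise_append]
              exact ⟨hsp, by rw [hPP]; exact posns_pairwise _ _ _,
                fun a ha b hb => by have := hs a ha; have := hPge b hb; omega⟩)
          hs hPge]
        have hl'' : (l.set i ((i : Int) + 1)).set i ((i : Int) + 1) = l := by
          rw [List.set_set, ← hv01, set_getD_self l i hi]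
        rw [hl'', hw1, ← hPP]
        simp
    · -- w = old nums[i] ≠ i+1: position i leaves w, position jn now holds it
      have hvw : l.getD i 0 = w := hw0.symm
      have hv01 : l.getD i 0 ≠ (i : Int) + 1 := by rw [hvw]; exact hw1
      have hji : jn ≠ i := by
        intro hh
        have h2 := hmv
        rw [hh] at h2
        exact hv01 h2
      have hij1 : i + 1 ≤ jn := by omega
      obtain ⟨s0, hs0, hsp0, ho0⟩ := h w
      have hQc : posns l w i = (i : Int) :: posns l w (i + 1) := posns_cons_pos l w i hi hvw
      have hQpw := posns_pairwise l w (i + 1)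
      refine ⟨s0 ++ [(i : Int)], ?_, ?_, ?_⟩
      · intro x hx
        rcases List.mem_append.1 hx with hx | hx
        · have := hs0 x hx; omega
        · simp at hx; omega
      · rw [List.pairwise_append]
        exact ⟨hsp0, List.pairwise_singleton _ _,
          fun a ha b hb => by simp at hb; subst hb; have := hs0 a ha; omega⟩
      · rw [hg2, if_pos hw0, hvw, hg1, if_neg hw1, ho0, hQc]
        have hsplit : s0 ++ (i : Int) :: posns l w (i + 1) =
            (s0 ++ (i : Int) :: (posns l w (i + 1)).takeWhile (fun y => y < ((jn : Nat) : Int))) ++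
              (posns l w (i + 1)).dropWhile (fun y => y < ((jn : Nat) : Int)) := by
          rw [List.append_assoc, List.cons_append, List.takeWhile_append_dropWhile]
        rw [hsplit]
        rw [insortLeft_split _ _ _
          (by rw [← hsplit, ← hQc]; exact pairwise_stale_posns s0 l w i hs0 hsp0)
          (by intro y hy
              rcases List.mem_append.1 hy with hy | hy
              · have := hs0 y hy; omega
              · rcases List.mem_cons.1 hy with rfl | hy
                · omega
                · have := List.mem_takeWhile_imp hy
                  simpa using this)
          (dropWhile_ge _ _ hQpw)]
        have hset : posns ((l.set i ((i : Int) + 1)).set jn w) w (i + 1) =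
            (posns l w (i + 1)).takeWhile (fun y => y < ((jn : Nat) : Int)) ++
              ((jn : Nat) : Int) :: (posns l w (i + 1)).dropWhile (fun y => y < ((jn : Nat) : Int)) := by
          have h0 : posns (l.set i ((i : Int) + 1)) w (i + 1) = posns l w (i + 1) :=
            posns_set_lt l w ((i : Int) + 1) i (i + 1) (by omega)
          rw [posns_set_self (l.set i ((i : Int) + 1)) w jn (i + 1) hij1 (by simpa using hml)
            (by rw [getD_set_ne l i jn ((i : Int) + 1) 0 (fun hh => hji hh.symm), hmv]
                exact fun hh => hw1 hh.symm), h0]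
        rw [hset]
        simp
  · by_cases hw1 : w = (i : Int) + 1
    · -- w = i+1 ≠ old nums[i]: its first position jn is consumed
      have hvw : l.getD i 0 ≠ w := fun hh => hw0 hh.symm
      refine ⟨s, fun x hx => by have := hs x hx; omega, hsp, ?_⟩
      rw [hg2, if_neg hw0, hg1, if_pos hw1]
      have h1 : posns (l.set i ((i : Int) + 1)) w (i + 1) = (jn : Int) :: P := by
        rw [posns_set_lt l w ((i : Int) + 1) i (i + 1) (by omega),
            ← posns_cons_neg l w i hi hvw, hw1]
        exact hP
      rw [posns_set_head (l.set i ((i : Int) + 1)) w (l.getD i 0) jn (i + 1) P hvw h1]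
    · -- w untouched by the swap
      obtain ⟨s0, hs0, hsp0, ho0⟩ := h w
      have hvw : l.getD i 0 ≠ w := fun hh => hw0 hh.symm
      refine ⟨s0, fun x hx => by have := hs0 x hx; omega, hsp0, ?_⟩
      rw [hg2, if_neg hw0, hg1, if_neg hw1, ho0, posns_cons_neg l w i hi hvw]
      have hm2 : (l.set i ((i : Int) + 1)).getD jn 0 ≠ w := by
        by_cases hji : jn = i
        · subst hji
          rw [getD_set_self l jn ((jn : Int) + 1) 0 hi]
          exact fun hh => hw1 hh.symm
        · rw [getD_set_ne l i jn ((i : Int) + 1) 0 (fun hh => hji hh.symm), hmv]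
          exact fun hh => hw1 hh.symm
      rw [posns_set_other (l.set i ((i : Int) + 1)) w (l.getD i 0) jn (i + 1) hvw hm2,
          posns_set_lt l w ((i : Int) + 1) i (i + 1) (by omega)]

theorem innerA_nil (l : List Int) (i j : Nat) (hP : posns l ((i : Int) + 1) j = []) :
    innerA l i j = l := by
  revert hP
  induction j using innerA.induct l i with
  | case1 j h he =>
    intro hP
    rw [posns_cons_pos l _ j h he] at hP; exact absurd hP (by simp)
  | case2 j h he ih =>
    intro hP
    rw [posns_cons_neg l _ j h he] at hP
    rw [innerA, if_pos h, if_neg he]; exact ih hP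
  | case3 j h =>
    intro _; rw [innerA, if_neg h]

theorem innerA_cons (l : List Int) (i j jn : Nat) (P : List Int)
    (hP : posns l ((i : Int) + 1) j = (jn : Int) :: P) :
    innerA l i j = (l.set jn (l.getD i 0)).set i (l.getD jn 0) := by
  revert hP
  induction j using innerA.induct l i with
  | case1 j h he =>
    intro hP
    rw [posns_cons_pos l _ j h he] at hP
    obtain ⟨h1, _⟩ := List.cons.inj hP
    have : jn = j := by omega
    subst this
    rw [innerA, if_pos h, if_pos he]
  | case2 j h he ih =>
    intro hP
    rw [posns_cons_neg l _ j h he] at hP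
    rw [innerA, if_pos h, if_neg he]
    exact ih hP
  | case3 j h =>
    intro hP
    rw [posns_nil l _ j h] at hP; exact absurd hP (by simp)

-- the two swap phrasings produce the same list
theorem swap_eq (l : List Int) (i jn : Nat) (hi : i < l.length) (hj : jn < l.length)
    (hv : l.getD jn 0 = (i : Int) + 1) :
    (l.set jn (l.getD i 0)).set i (l.getD jn 0) =
      (l.set i ((i : Int) + 1)).set jn (l.getD i 0) := by
  by_cases hij : jn = i
  · subst hij
    rw [List.set_set, List.set_set, hv]
  · rw [hv, List.set_comm _ _ hij]

-- main loop equivalence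
theorem loop_eq (N : Nat) : ∀ (i : Nat) (l : List Int) (occ : PySem.Dict Int (List Int)),
    l.length = N → LoopInv l occ i → loopB N l occ i = outerA l i := by
  suffices key : ∀ (d i : Nat) (l : List Int) (occ : PySem.Dict Int (List Int)),
      N - i ≤ d → l.length = N → LoopInv l occ i → loopB N l occ i = outerA l i by
    intro i l occ h1 h2
    exact key (N - i) i l occ (le_refl _) h1 h2
  intro d
  induction d with
  | zero =>
    intro i l occ hd h1 _
    have hni : ¬ i < N := by omega
    rw [loopB, if_neg hni, outerA, if_neg (show ¬ i < l.length by omega)]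
  | succ d ih =>
    intro i l occ hd h1 hInv
    by_cases hi : i < N
    · have hil : i < l.length := by omega
      rw [loopB, if_pos hi, outerA, if_pos hil]
      dsimp only
      obtain ⟨s, hs, hsp, ho⟩ := hInv ((i : Int) + 1)
      cases hP : posns l ((i : Int) + 1) i with
      | nil =>
        rw [hP, List.append_nil] at ho
        have hb : PySem.List.bisectLeft (occ.getD ((i : Int) + 1) []) (i : Int) = s.length := by
          rw [ho]
          have := bisectLeft_eq s [] (i : Int) (by simpa using hsp) hs (by simp)
          simpa using this
        rw [hb, ho, if_neg (by omega)]
        rw [innerA_nil l i i hP]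
        exact ih (i + 1) l occ (by omega) h1 (inv_step_none l occ i hInv hil)
      | cons x P =>
        obtain ⟨jn, hmeq, him, hjl, hjv, hPr⟩ := posns_head l ((i : Int) + 1) i x P hP
        subst hmeq
        rw [hP] at ho
        have hwge : ∀ y ∈ (jn : Int) :: P, (i : Int) ≤ y := fun y hy =>
          posns_ge l ((i : Int) + 1) i y (by rw [hP]; exact hy)
        have hb : PySem.List.bisectLeft (occ.getD ((i : Int) + 1) []) (i : Int) = s.length := by
          rw [ho]
          exact bisectLeft_eq s ((jn : Int) :: P) (i : Int)
            (by rw [← ho]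
                have := pairwise_stale_posns s l ((i : Int) + 1) i hs hsp
                rw [hP] at this
                rw [ho]
                exact this)
            hs hwge
        rw [hb, ho, if_pos (by simp)]
        rw [getD_append_len s P ((jn : Int)) 0, eraseIdx_append_len s P ((jn : Int)),
            Int.toNat_natCast]
        rw [innerA_cons l i i jn P hP, swap_eq l i jn hil hjl hjv]
        exact ih (i + 1) _ _ (by omega) (by simp [h1])
          (inv_step_swap l occ i jn s P hInv hil hs hsp ho hP)
    · rw [loopB, if_neg hi, outerA, if_neg (show ¬ i < l.length by omega)]

-- initial dict: every value maps to all of its positions, ascending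
def posnsAux (t : List Int) (w : Int) (k : Nat) : List Int :=
  match t with
  | [] => []
  | x :: xs => if x = w then (k : Int) :: posnsAux xs w (k + 1) else posnsAux xs w (k + 1)

theorem build_aux (t : List Int) : ∀ (k : Nat) (d : PySem.Dict Int (List Int)) (w : Int),
    ((PySem.List.enumerate t (k : Int)).foldl
      (fun d p => d.insert p.2 (d.getD p.2 [] ++ [p.1])) d).getD w []
      = d.getD w [] ++ posnsAux t w k := by
  induction t with
  | nil => intro k d w; simp [PySem.List.enumerate_nil, posnsAux]
  | cons x xs ih =>
    intro k d w
    rw [PySem.List.enumerate_cons, List.foldl_cons]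
    have : ((k : Int) + 1) = (((k + 1 : Nat)) : Int) := by push_cast; ring
    rw [this, ih (k + 1)]
    rw [PySem.Dict.getD_insert]
    by_cases hw : w = x
    · subst hw
      simp only [if_true, posnsAux, List.append_assoc]
      simp
    · simp only [hw, if_false, posnsAux]
      rw [if_neg (show ¬ x = w from fun h => hw h.symm)]

theorem posnsAux_drop (l : List Int) (w : Int) : ∀ k : Nat,
    posnsAux (l.drop k) w k = posns l w k := by
  intro k
  induction k using posns.induct l w with
  | case1 k h he ih =>
    rw [List.drop_eq_getElem_cons h, posns_cons_pos l w k h he]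
    have : l[k] = w := by
      rw [← he]; simp [List.getD_eq_getElem?_getD, List.getElem?_eq_getElem h]
    simp only [posnsAux, this, if_true]
    rw [ih]
  | case2 k h he ih =>
    rw [List.drop_eq_getElem_cons h, posns_cons_neg l w k h he]
    have : l[k] ≠ w := by
      intro hc; apply he
      rw [← hc]; simp [List.getD_eq_getElem?_getD, List.getElem?_eq_getElem h]
    simp only [posnsAux, this, if_false]
    rw [ih]
  | case3 k h =>
    rw [posns_nil l w k h, List.drop_eq_nil_of_le (by omega)]
    rfl

theorem build_inv (l : List Int) : LoopInv l (buildOcc l) 0 := by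
  intro v
  refine ⟨[], by simp, List.Pairwise.nil, ?_⟩
  unfold buildOcc
  rw [show (0 : Int) = ((0 : Nat) : Int) from rfl, build_aux l 0 PySem.Dict.empty v]
  rw [PySem.Dict.getD_empty]
  simpa using posnsAux_drop l v 0

-- ===== VERDICT (by name: the statement is the Claim_ definition above) =====
theorem sort_with_n_square_time_complexity_spec : Claim_equal_sort_with_n_square_time_complexity := by
  intro nums _
  unfold Spec_sort_with_n_square_time_complexity
  unfold sort_with_n_square_time_complexity sort_with_n_square_time_complexity_alt
  rw [loop_eq nums.length 0 nums (buildOcc nums) rfl (build_inv nums)]
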